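-- pv_equiv track=rewrite | github.com/doomspec/Mizore | src/mizore/transpiler/measurement/derand_impl.py | to_p_string
-- ===== SOURCE A (Python) =====
-- def to_p_string(tuples, nqubit):
--     dict = {}
--     for t in tuples:
--         dict[t[0]] = t[1]
--     results = []
--     for j in range(nqubit):
--         if j not in dict:
--             results.append("I")
--         else:
--             results.append(dict[j])
--     return "".join(results)
-- ===== SOURCE B (Python) =====
-- def to_p_string(tuples, nqubit):
--     results = ["I"] * nqubit
--     for q, op in tuples:
--         if 0 <= q < nqubit:
--             results[q] = op
--     return "".join(results)
-- ===== Notes on version B (the rewrite author's own statement) =====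
-- stated objective: simpler
-- what changed: Replaces A's dict-building pass plus gather loop over range(nqubit) with a preallocated ['I']*nqubit list and a single scatter pass over the tuples (bounds-guarded, last write wins), then one join; dropping the dict and per-index membership test is a constant-factor win.
import Mathlib
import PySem

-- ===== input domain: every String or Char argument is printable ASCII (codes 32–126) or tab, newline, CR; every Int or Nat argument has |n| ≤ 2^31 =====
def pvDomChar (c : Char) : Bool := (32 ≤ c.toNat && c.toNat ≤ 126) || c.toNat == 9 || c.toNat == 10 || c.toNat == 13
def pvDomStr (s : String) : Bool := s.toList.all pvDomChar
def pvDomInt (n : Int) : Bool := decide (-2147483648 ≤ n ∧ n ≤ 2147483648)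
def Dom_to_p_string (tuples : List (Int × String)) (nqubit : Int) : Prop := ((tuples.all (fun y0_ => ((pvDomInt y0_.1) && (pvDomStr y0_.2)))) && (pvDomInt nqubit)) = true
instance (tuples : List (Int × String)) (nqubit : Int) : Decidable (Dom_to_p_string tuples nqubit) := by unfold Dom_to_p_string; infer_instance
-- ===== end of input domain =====

-- B replaces A's dict-building pass plus gather loop over range(nqubit) with a
-- preallocated ['I']*nqubit list and a single bounds-guarded scatter pass over the
-- tuples (last write wins); objective: simpler.

-- ===== PORT A =====
def to_p_string (tuples : List (Int × String)) (nqubit : Int) : String :=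
  let d : PySem.Dict Int String :=
    tuples.foldl (fun d t => d.insert t.1 t.2) PySem.Dict.empty
  let results : List String :=
    (PySem.List.pyRange 0 nqubit 1).foldl
      (fun rs j => if d.contains j = false then rs ++ ["I"] else rs ++ [d.getD j "I"]) []
  PySem.Str.join "" results

-- ===== PORT B =====
def to_p_string_alt (tuples : List (Int × String)) (nqubit : Int) : String :=
  let results : List String :=
    tuples.foldl
      (fun rs t => if 0 ≤ t.1 ∧ t.1 < nqubit then rs.set t.1.toNat t.2 else rs)
      (List.replicate nqubit.toNat "I")
  PySem.Str.join "" results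

-- ===== PRECONDITION & SPEC =====
def Spec_to_p_string (tuples : List (Int × String)) (nqubit : Int) (out : String) : Prop := out = to_p_string_alt tuples nqubit
instance (tuples : List (Int × String)) (nqubit : Int) (out : String) : Decidable (Spec_to_p_string tuples nqubit out) := by unfold Spec_to_p_string; infer_instance

-- ===== CLAIM (what is proved, stated in full; the proofs are below) =====
def Claim_equal_to_p_string : Prop := ∀ (tuples : List (Int × String)) (nqubit : Int), Dom_to_p_string tuples nqubit → Spec_to_p_string tuples nqubit (to_p_string tuples nqubit)

-- ===== LEMMAS AND PROOFS =====

-- Invariant of B's scatter loop vs A's dict-building loop: the list always holds,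
-- at each slot k < nqubit, the dict's value at key k (default "I").
lemma scatter_gather (nqubit : Int) (ts : List (Int × String))
    (d : PySem.Dict Int String) (l : List String)
    (hlen : l.length = nqubit.toNat)
    (hinv : ∀ k : Nat, k < nqubit.toNat →
      l[k]? = some (if d.contains (k : Int) then d.getD (k : Int) "I" else "I")) :
    (ts.foldl (fun rs t => if 0 ≤ t.1 ∧ t.1 < nqubit then rs.set t.1.toNat t.2 else rs) l).length
      = nqubit.toNat ∧
    ∀ k : Nat, k < nqubit.toNat →
      (ts.foldl (fun rs t => if 0 ≤ t.1 ∧ t.1 < nqubit then rs.set t.1.toNat t.2 else rs) l)[k]?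
        = some (if (ts.foldl (fun d t => d.insert t.1 t.2) d).contains (k : Int)
          then (ts.foldl (fun d t => d.insert t.1 t.2) d).getD (k : Int) "I" else "I") := by
  induction ts generalizing d l with
  | nil => exact ⟨hlen, hinv⟩
  | cons t rest ih =>
    simp only [List.foldl_cons]
    apply ih
    · split <;> simp [hlen]
    · intro k hk
      by_cases hg : 0 ≤ t.1 ∧ t.1 < nqubit
      · rw [if_pos hg, List.getElem?_set]
        by_cases hkt : (k : Int) = t.1
        · have hkn : t.1.toNat = k := by omega
          have hkl : k < l.length := by omega
          simp [hkn, hkl, hkt]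
        · have hkn : t.1.toNat ≠ k := by omega
          have hb : ((k : Int) == t.1) = false := by simpa using hkt
          simp only [hkn, if_false, PySem.Dict.contains_insert, PySem.Dict.getD_insert,
            if_neg hkt, hb, Bool.false_or]
          exact hinv k hk
      · rw [if_neg hg]
        have hkt : (k : Int) ≠ t.1 := by omega
        have hb : ((k : Int) == t.1) = false := by simpa using hkt
        simp only [PySem.Dict.contains_insert, PySem.Dict.getD_insert, if_neg hkt, hb,
          Bool.false_or]
        exact hinv k hk

lemma a_results_eq_map (d : PySem.Dict Int String) (nqubit : Int) :
    (PySem.List.pyRange 0 nqubit 1).foldl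
      (fun rs j => if d.contains j = false then rs ++ ["I"] else rs ++ [d.getD j "I"]) []
    = (PySem.List.pyRange 0 nqubit 1).map
        (fun j => if d.contains j then d.getD j "I" else "I") := by
  have hf : (fun (rs : List String) (j : Int) =>
        if d.contains j = false then rs ++ ["I"] else rs ++ [d.getD j "I"])
      = fun rs j => rs ++ [if d.contains j then d.getD j "I" else "I"] := by
    funext rs j
    by_cases h : d.contains j <;> simp [h]
  rw [hf]
  simpa using PySem.List.foldl_append_singleton_eq_map
    (f := fun j => if d.contains j then d.getD j "I" else "I")
    (l := PySem.List.pyRange 0 nqubit 1) (acc := ([] : List String))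

-- ===== VERDICT (by name: the statement is the Claim_ definition above) =====
theorem to_p_string_spec : Claim_equal_to_p_string := by
  intro tuples nqubit _
  unfold Spec_to_p_string
  simp only [to_p_string, to_p_string_alt]
  obtain ⟨hlen, hval⟩ := scatter_gather nqubit tuples PySem.Dict.empty
    (List.replicate nqubit.toNat "I") (by simp) (by intro k hk; simp [hk])
  rw [a_results_eq_map]
  congr 1
  apply List.ext_getElem
  · simpa [PySem.List.length_pyRange_one] using hlen.symm
  · intro k h1 h2
    have hk : k < nqubit.toNat := by
      simpa [PySem.List.length_pyRange_one] using h1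
    have hv := hval k hk
    rw [List.getElem?_eq_getElem h2] at hv
    have hv' := Option.some.inj hv
    rw [hv']
    simp [PySem.List.getElem_pyRange_one]
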